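-- pv_equiv track=rewrite | github.com/rschaeff/pyecod_mini | src/pyecod_mini/core/decomposer.py | build_alignment_mapping
-- ===== SOURCE A (Python) =====
-- from typing import List, Dict, Tuple, Optional, Set
--
-- def build_alignment_mapping(query_str: str, hit_str: str,
--                            query_start: int, hit_start: int) -> Dict[int, int]:
--     """
--     Build position mapping from query to hit using alignment strings
--     FIXED: Ensure consistent 0-based indexing
--     """
--     if len(query_str) != len(hit_str):
--         raise ValueError(f"Alignment strings have different lengths: {len(query_str)} vs {len(hit_str)}")
--
--     mapping = {}
--     query_pos = query_start - 1  # Convert to 0-based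
--     hit_pos = hit_start - 1      # Convert to 0-based
--
--     for q_char, h_char in zip(query_str, hit_str):
--         # Record mapping when both are non-gaps (BEFORE advancing positions)
--         if q_char != '-' and h_char != '-':
--             mapping[query_pos] = hit_pos
--
--         # Advance positions for non-gap characters
--         if q_char != '-':
--             query_pos += 1
--         if h_char != '-':
--             hit_pos += 1
--
--     return mapping
-- ===== SOURCE B (Python) =====
-- def build_alignment_mapping(query_str: str, hit_str: str,
--                             query_start: int, hit_start: int) -> dict:
--     if len(query_str) != len(hit_str):
--         raise ValueError(f"Alignment strings have different lengths: {len(query_str)} vs {len(hit_str)}")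
--
--     # Pass 1: per-column query position table
--     q_positions = []
--     q = query_start - 1
--     for c in query_str:
--         q_positions.append(q)
--         if c != '-':
--             q += 1
--
--     # Pass 2: per-column hit position table
--     h_positions = []
--     h = hit_start - 1
--     for c in hit_str:
--         h_positions.append(h)
--         if c != '-':
--             h += 1
--
--     # Single comprehension over columns where both sides are residues
--     return {qp: hp
--             for qp, hp, qc, hc in zip(q_positions, h_positions, query_str, hit_str)
--             if qc != '-' and hc != '-'}
-- ===== Notes on version B (the rewrite author's own statement) =====
-- stated objective: alternative
-- what changed: Replaces the single stateful loop (dict + two running counters mutated per column) with two independent precomputed position tables and one dict comprehension over the zipped columns.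
import Mathlib
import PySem

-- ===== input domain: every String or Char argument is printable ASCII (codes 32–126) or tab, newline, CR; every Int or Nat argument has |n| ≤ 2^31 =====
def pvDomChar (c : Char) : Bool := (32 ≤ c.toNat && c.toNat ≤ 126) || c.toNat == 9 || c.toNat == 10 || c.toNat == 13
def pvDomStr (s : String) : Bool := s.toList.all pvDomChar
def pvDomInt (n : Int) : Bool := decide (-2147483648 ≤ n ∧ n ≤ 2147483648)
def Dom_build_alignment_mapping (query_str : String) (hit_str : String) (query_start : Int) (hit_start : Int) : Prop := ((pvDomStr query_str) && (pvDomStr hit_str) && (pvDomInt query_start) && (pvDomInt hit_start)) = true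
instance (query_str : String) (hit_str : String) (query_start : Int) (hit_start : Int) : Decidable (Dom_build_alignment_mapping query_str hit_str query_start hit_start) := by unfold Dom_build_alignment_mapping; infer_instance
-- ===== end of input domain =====

-- B replaces A's single stateful loop with two precomputed position tables plus one comprehension over zipped columns (alternative decomposition, same cost).


-- ===== PORT A =====
-- A's loop body: record (before advancing), then advance each counter on non-gap
def stepA (st : PySem.Dict Int Int × Int × Int) (qh : Char × Char) : PySem.Dict Int Int × Int × Int :=
  (if qh.1 ≠ '-' ∧ qh.2 ≠ '-' then st.1.insert st.2.1 st.2.2 else st.1,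
   if qh.1 ≠ '-' then st.2.1 + 1 else st.2.1,
   if qh.2 ≠ '-' then st.2.2 + 1 else st.2.2)

def build_alignment_mapping (query_str : String) (hit_str : String) (query_start : Int) (hit_start : Int) : List (Int × Int) :=
  ((query_str.toList.zip hit_str.toList).foldl stepA
    (PySem.Dict.empty, query_start - 1, hit_start - 1)).1.items

-- ===== PORT B =====
-- per-column position table: position before each column, advancing on non-gap
def positionsB (cs : List Char) (p : Int) : List Int :=
  match cs with
  | [] => []
  | c :: rest => p :: positionsB rest (if c ≠ '-' then p + 1 else p)

-- B's dict-comprehension body over one zipped column ((qp, hp), (qc, hc))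
def stepB (d : PySem.Dict Int Int) (t : (Int × Int) × (Char × Char)) : PySem.Dict Int Int :=
  if t.2.1 ≠ '-' ∧ t.2.2 ≠ '-' then d.insert t.1.1 t.1.2 else d

def build_alignment_mapping_alt (query_str : String) (hit_str : String) (query_start : Int) (hit_start : Int) : List (Int × Int) :=
  let qs := query_str.toList
  let hs := hit_str.toList
  let qpos := positionsB qs (query_start - 1)
  let hpos := positionsB hs (hit_start - 1)
  -- {qp: hp for qp, hp, qc, hc in zip(q_positions, h_positions, query_str, hit_str) if ...}
  (((qpos.zip hpos).zip (qs.zip hs)).foldl stepB PySem.Dict.empty).items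

-- ===== PRECONDITION & SPEC =====
-- Pre_ excludes exactly the inputs where A raises ValueError: alignment strings of different lengths.
def Pre_build_alignment_mapping (query_str : String) (hit_str : String) (query_start : Int) (hit_start : Int) : Prop :=
  query_str.toList.length = hit_str.toList.length
instance (query_str : String) (hit_str : String) (query_start : Int) (hit_start : Int) : Decidable (Pre_build_alignment_mapping query_str hit_str query_start hit_start) := by unfold Pre_build_alignment_mapping; infer_instance
def pvWitness_build_alignment_mapping : String × String × Int × Int := ("AB-CD", "A-BC-", 3, 7)

def Spec_build_alignment_mapping (query_str : String) (hit_str : String) (query_start : Int) (hit_start : Int) (out : List (Int × Int)) : Prop := out = build_alignment_mapping_alt query_str hit_str query_start hit_start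
instance (query_str : String) (hit_str : String) (query_start : Int) (hit_start : Int) (out : List (Int × Int)) : Decidable (Spec_build_alignment_mapping query_str hit_str query_start hit_start out) := by unfold Spec_build_alignment_mapping; infer_instance

-- ===== CLAIM (what is proved, stated in full; the proofs are below) =====
def Claim_equal_build_alignment_mapping : Prop := ∀ (query_str : String) (hit_str : String) (query_start : Int) (hit_start : Int), Dom_build_alignment_mapping query_str hit_str query_start hit_start → Pre_build_alignment_mapping query_str hit_str query_start hit_start → Spec_build_alignment_mapping query_str hit_str query_start hit_start (build_alignment_mapping query_str hit_str query_start hit_start)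

-- ===== LEMMAS AND PROOFS =====

-- reference result: the mapping pairs emitted column by column
def specMap : List (Char × Char) → Int → Int → List (Int × Int)
  | [], _, _ => []
  | (q, h) :: t, qp, hp =>
    (if q ≠ '-' ∧ h ≠ '-' then [(qp, hp)] else [])
      ++ specMap t (if q ≠ '-' then qp + 1 else qp) (if h ≠ '-' then hp + 1 else hp)

theorem portA_loop (l : List (Char × Char)) :
    ∀ (d : PySem.Dict Int Int) (qp hp : Int),
      d.keys.Nodup → (∀ k ∈ d.keys, k < qp) →
      ((l.foldl stepA (d, qp, hp)).1).items = d.items ++ specMap l qp hp := by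
  induction l with
  | nil => intro d qp hp _ _; simp [specMap]
  | cons qh t ih =>
    intro d qp hp hnd hlt
    obtain ⟨q, h⟩ := qh
    have hnc : d.contains qp = false := by
      rw [PySem.Dict.contains_eq_decide_mem_keys]
      simp only [decide_eq_false_iff_not]
      intro hm; exact absurd (hlt qp hm) (lt_irrefl qp)
    have hlt' : ∀ k ∈ d.keys, k < qp + 1 := fun k hk => by have := hlt k hk; omega
    have hlt1 : ∀ k ∈ (d.insert qp hp).keys, k < qp + 1 := by
      intro k hk
      rw [PySem.Dict.mem_keys_insert] at hk
      rcases hk with rfl | hk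
      · omega
      · exact hlt' k hk
    rw [List.foldl_cons]
    by_cases hq : q = '-' <;> by_cases hh : h = '-'
    · have hs : stepA (d, qp, hp) (q, h) = (d, qp, hp) := by simp [stepA, hq, hh]
      rw [hs, ih d qp hp hnd hlt]; simp [specMap, hq, hh]
    · have hs : stepA (d, qp, hp) (q, h) = (d, qp, hp + 1) := by simp [stepA, hq, hh]
      rw [hs, ih d qp (hp + 1) hnd hlt]; simp [specMap, hq, hh]
    · have hs : stepA (d, qp, hp) (q, h) = (d, qp + 1, hp) := by simp [stepA, hq, hh]
      rw [hs, ih d (qp + 1) hp hnd hlt']; simp [specMap, hq, hh]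
    · have hs : stepA (d, qp, hp) (q, h) = (d.insert qp hp, qp + 1, hp + 1) := by
        simp [stepA, hq, hh]
      rw [hs, ih (d.insert qp hp) (qp + 1) (hp + 1)
            (PySem.Dict.nodup_keys_insert d qp hp hnd) hlt1,
          PySem.Dict.items_insert_of_not_contains d hp hnc]
      simp [specMap, hq, hh]

theorem portB_loop (qs : List Char) :
    ∀ (hs : List Char) (d : PySem.Dict Int Int) (qp hp : Int),
      d.keys.Nodup → (∀ k ∈ d.keys, k < qp) →
      ((((positionsB qs qp).zip (positionsB hs hp)).zip (qs.zip hs)).foldl stepB d).items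
        = d.items ++ specMap (qs.zip hs) qp hp := by
  induction qs with
  | nil => intro hs d qp hp _ _; simp [positionsB, specMap]
  | cons q t ih =>
    intro hs d qp hp hnd hlt
    cases hs with
    | nil => simp [positionsB, specMap]
    | cons h ht =>
      have hnc : d.contains qp = false := by
        rw [PySem.Dict.contains_eq_decide_mem_keys]
        simp only [decide_eq_false_iff_not]
        intro hm; exact absurd (hlt qp hm) (lt_irrefl qp)
      have hlt' : ∀ k ∈ d.keys, k < qp + 1 := fun k hk => by have := hlt k hk; omega
      have hlt1 : ∀ k ∈ (d.insert qp hp).keys, k < qp + 1 := by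
        intro k hk
        rw [PySem.Dict.mem_keys_insert] at hk
        rcases hk with rfl | hk
        · omega
        · exact hlt' k hk
      simp only [positionsB, List.zip_cons_cons, List.foldl_cons]
      by_cases hq : q = '-' <;> by_cases hh : h = '-'
      · have hs' : stepB d ((qp, hp), (q, h)) = d := by simp [stepB, hq, hh]
        rw [hs', hq, hh]
        simp only [ne_eq, not_true_eq_false, ite_false]
        rw [ih ht d qp hp hnd hlt]; simp [specMap, hq, hh]
      · have hs' : stepB d ((qp, hp), (q, h)) = d := by simp [stepB, hq]
        rw [hs', hq]
        simp only [ne_eq, hh, not_true_eq_false, not_false_eq_true, ite_false, ite_true]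
        rw [ih ht d qp (hp + 1) hnd hlt]; simp [specMap, hq, hh]
      · have hs' : stepB d ((qp, hp), (q, h)) = d := by simp [stepB, hh]
        rw [hs', hh]
        simp only [ne_eq, hq, not_true_eq_false, not_false_eq_true, ite_false, ite_true]
        rw [ih ht d (qp + 1) hp hnd hlt']; simp [specMap, hq, hh]
      · have hs' : stepB d ((qp, hp), (q, h)) = d.insert qp hp := by simp [stepB, hq, hh]
        rw [hs']
        simp only [ne_eq, hq, hh, not_false_eq_true, ite_true]
        rw [ih ht (d.insert qp hp) (qp + 1) (hp + 1)
              (PySem.Dict.nodup_keys_insert d qp hp hnd) hlt1,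
            PySem.Dict.items_insert_of_not_contains d hp hnc]
        simp [specMap, hq, hh]

-- ===== VERDICT (by name: the statement is the Claim_ definition above) =====
theorem build_alignment_mapping_spec : Claim_equal_build_alignment_mapping := by
  intro query_str hit_str query_start hit_start _ _
  unfold Spec_build_alignment_mapping build_alignment_mapping build_alignment_mapping_alt
  rw [portA_loop _ _ _ _ (by simp) (by simp),
      portB_loop _ _ _ _ _ (by simp) (by simp)]
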